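-- pv_equiv track=rewrite | github.com/SucreRouge/summer2014 | specification/valueIterator.py | setSum
-- ===== SOURCE A (Python) =====
-- def vecAdd(tupx, tupy):
--     return tuple(x + y for x,y in zip(tupx, tupy))
--
-- def setAdd(setx, sety):
--     return {vecAdd(x, y) for x in setx for y in sety}
--
-- def setSum(sets):
--     # sets: a list of sets
--     if not sets:
--         return set([]) #Nullary sum
--     else:
--         current = sets[0]
--         for x in sets[1:]:
--             current = setAdd(current, x)
--         return current
-- ===== SOURCE B (Python) =====
-- def setSum(sets):
--     # Minkowski sum by recursion on the list (right-associated), with the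
--     # componentwise sums inlined in a single set comprehension.
--     if not sets:
--         return set()
--     if len(sets) == 1:
--         return sets[0]
--     rest = setSum(sets[1:])
--     return {tuple(a + b for a, b in zip(v, w)) for v in sets[0] for w in rest}
-- ===== Notes on version B (the rewrite author's own statement) =====
-- stated objective: alternative
-- what changed: Replaces the iterative left fold of setAdd helpers with a direct right-associated recursion over the list whose componentwise vector sums are inlined in one set comprehension; equivalence rests on associativity of truncating vector addition.
import Mathlib
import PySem

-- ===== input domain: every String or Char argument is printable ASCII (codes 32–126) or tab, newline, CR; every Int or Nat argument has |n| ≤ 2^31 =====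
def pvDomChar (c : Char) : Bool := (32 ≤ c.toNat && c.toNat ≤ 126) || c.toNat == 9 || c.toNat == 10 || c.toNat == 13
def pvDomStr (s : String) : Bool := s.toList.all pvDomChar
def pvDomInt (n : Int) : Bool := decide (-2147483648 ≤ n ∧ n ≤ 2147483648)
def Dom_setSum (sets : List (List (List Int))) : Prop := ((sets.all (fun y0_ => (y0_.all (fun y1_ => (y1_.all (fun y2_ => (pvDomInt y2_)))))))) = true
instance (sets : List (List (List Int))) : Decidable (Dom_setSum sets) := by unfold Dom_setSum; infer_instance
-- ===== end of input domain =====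

-- B replaces A's iterative left fold of setAdd with a right-associated recursion whose
-- componentwise sums are inlined in one set comprehension (alternative decomposition, same cost).

-- ===== PORT A =====
def vecAdd (tupx tupy : List Int) : List Int :=
  (List.zip tupx tupy).map (fun p => p.1 + p.2)

def setAdd (setx sety : List (List Int)) : List (List Int) :=
  PySem.Set.ofList (setx.flatMap (fun x => sety.map (fun y => vecAdd x y)))

def setSum (sets : List (List (List Int))) : List (List Int) :=
  match sets with
  | [] => []
  | s0 :: rest => rest.foldl (fun current x => setAdd current x) s0

-- ===== PORT B =====
def setSum_alt : List (List (List Int)) → List (List Int)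
  | [] => []
  | [s] => s
  | s :: rest =>
      PySem.Set.ofList
        (s.flatMap (fun v => (setSum_alt rest).map (fun w => (List.zip v w).map (fun p => p.1 + p.2))))

-- ===== PRECONDITION & SPEC =====
def Spec_setSum (sets : List (List (List Int))) (out : List (List Int)) : Prop := out = setSum_alt sets
instance (sets : List (List (List Int))) (out : List (List Int)) : Decidable (Spec_setSum sets out) := by unfold Spec_setSum; infer_instance

-- ===== CLAIM (what is proved, stated in full; the proofs are below) =====
def Claim_equal_setSum : Prop := ∀ (sets : List (List (List Int))), Dom_setSum sets → Spec_setSum sets (setSum sets)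

-- ===== LEMMAS AND PROOFS =====

-- the raw (undeduplicated) pairwise-sum product list, the common skeleton of both ports
def pvJ (A B : List (List Int)) : List (List Int) :=
  A.flatMap (fun v => B.map (fun w => vecAdd v w))

theorem vecAdd_nil_left (b : List Int) : vecAdd [] b = [] := rfl

theorem vecAdd_nil_right (a : List Int) : vecAdd a [] = [] := by
  cases a <;> rfl

theorem vecAdd_cons (x y : Int) (xs ys : List Int) :
    vecAdd (x :: xs) (y :: ys) = (x + y) :: vecAdd xs ys := rfl

theorem vecAdd_assoc (a b c : List Int) :
    vecAdd (vecAdd a b) c = vecAdd a (vecAdd b c) := by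
  induction a generalizing b c with
  | nil => simp [vecAdd_nil_left]
  | cons x xs ih =>
      cases b with
      | nil => simp [vecAdd_nil_left, vecAdd_nil_right]
      | cons y ys =>
          cases c with
          | nil => simp [vecAdd_nil_right]
          | cons z zs => simp [vecAdd_cons, ih, Int.add_assoc]

theorem pvJ_assoc (A B C : List (List Int)) :
    pvJ (pvJ A B) C = pvJ A (pvJ B C) := by
  induction A with
  | nil => rfl
  | cons a A ih =>
      simp only [pvJ, List.flatMap_cons] at *
      simp [List.flatMap_append, ih, List.flatMap_map, List.map_flatMap, List.map_map,
        Function.comp_def, vecAdd_assoc]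

theorem update_of_forall_mem {α : Type} [BEq α] [LawfulBEq α] (s : PySem.Set α) (L : List α)
    (h : ∀ e ∈ L, e ∈ s) : PySem.Set.update s L = s := by
  induction L generalizing s with
  | nil => rfl
  | cons x xs ih =>
      rw [PySem.Set.update_cons, PySem.Set.add_of_mem (h x (by simp))]
      exact ih s (fun e he => h e (by simp [he]))

-- dropping the occurrences of x from L does not change the update when g x is already absorbed
theorem update_flatMap_filter {α β : Type} [BEq α] [LawfulBEq α] [BEq β] [LawfulBEq β]
    (g : α → List β) (x : α) (s : PySem.Set β) (L : List α)
    (h : ∀ e ∈ g x, e ∈ s) :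
    PySem.Set.update s ((L.filter (fun y => !y == x)).flatMap g) =
      PySem.Set.update s (L.flatMap g) := by
  induction L generalizing s with
  | nil => rfl
  | cons y L ih =>
      by_cases hyx : y = x
      · subst hyx
        have hf : List.filter (fun y_1 => !y_1 == y) (y :: L) =
            List.filter (fun y_1 => !y_1 == y) L := by simp
        rw [hf, List.flatMap_cons, PySem.Set.update_append,
          update_of_forall_mem s (g y) h, ih s h]
      · have hf : List.filter (fun y_1 => !y_1 == x) (y :: L) =
            y :: List.filter (fun y_1 => !y_1 == x) L := by simp [hyx]
        rw [hf, List.flatMap_cons, List.flatMap_cons, PySem.Set.update_append,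
          PySem.Set.update_append]
        exact ih _ (fun e he => (PySem.Set.mem_update _ _ _).mpr (Or.inl (h e he)))

-- deduplicating the outer list before flat-mapping does not change the accumulated set
theorem update_flatMap_ofList {α β : Type} [BEq α] [LawfulBEq α] [BEq β] [LawfulBEq β]
    (g : α → List β) (s : PySem.Set β) (A : List α) :
    PySem.Set.update s ((PySem.Set.ofList A).flatMap g) =
      PySem.Set.update s (A.flatMap g) := by
  induction A generalizing s with
  | nil => rfl
  | cons a A ih =>
      rw [PySem.Set.ofList_cons]
      simp only [List.flatMap_cons, PySem.Set.update_append, PySem.Set.discard]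
      rw [update_flatMap_filter g a _ _
        (fun e he => (PySem.Set.mem_update _ _ _).mpr (Or.inr he))]
      exact ih _

theorem update_map_ofList {α β : Type} [BEq α] [LawfulBEq α] [BEq β] [LawfulBEq β]
    (f : α → β) (s : PySem.Set β) (B : List α) :
    PySem.Set.update s ((PySem.Set.ofList B).map f) = PySem.Set.update s (B.map f) := by
  have h := update_flatMap_ofList (fun y => [f y]) s B
  rw [← List.map_eq_flatMap, ← List.map_eq_flatMap] at h
  exact h

theorem ofList_eq_update_nil {α : Type} [BEq α] (L : List α) :
    PySem.Set.ofList L = PySem.Set.update [] L := rfl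

-- L1: the left argument of pvJ may be deduplicated under ofList
theorem ofList_pvJ_ofList_left (A C : List (List Int)) :
    PySem.Set.ofList (pvJ (PySem.Set.ofList A) C) = PySem.Set.ofList (pvJ A C) := by
  rw [ofList_eq_update_nil, ofList_eq_update_nil (pvJ A C)]
  exact update_flatMap_ofList (fun v => C.map (fun w => vecAdd v w)) [] A

-- L2: the right argument of pvJ may be deduplicated under ofList
theorem update_pvJ_ofList_right (s : PySem.Set (List Int)) (A B : List (List Int)) :
    PySem.Set.update s (pvJ A (PySem.Set.ofList B)) = PySem.Set.update s (pvJ A B) := by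
  induction A generalizing s with
  | nil => rfl
  | cons a A ih =>
      simp only [pvJ, List.flatMap_cons, PySem.Set.update_append]
      rw [update_map_ofList (fun w => vecAdd a w) s B]
      exact ih _

theorem setAdd_eq_ofList_pvJ (sx sy : List (List Int)) :
    setAdd sx sy = PySem.Set.ofList (pvJ sx sy) := rfl

theorem setSum_alt_cons (s x : List (List Int)) (r : List (List (List Int))) :
    setSum_alt (s :: x :: r) = PySem.Set.ofList (pvJ s (setSum_alt (x :: r))) := rfl

-- the left fold of setAdd equals the dedup of the right-associated raw product
theorem foldl_setAdd_eq (rest : List (List (List Int))) (cur : List (List Int))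
    (h : rest ≠ []) :
    rest.foldl (fun current x => setAdd current x) cur =
      PySem.Set.ofList (pvJ cur (setSum_alt rest)) := by
  induction rest generalizing cur with
  | nil => exact absurd rfl h
  | cons x r ih =>
      cases r with
      | nil => rfl
      | cons y r' =>
          rw [List.foldl_cons, ih (setAdd cur x) (by simp)]
          rw [setAdd_eq_ofList_pvJ, ofList_pvJ_ofList_left, pvJ_assoc]
          rw [ofList_eq_update_nil (pvJ cur (pvJ x (setSum_alt (y :: r')))),
            ← update_pvJ_ofList_right [] cur (pvJ x (setSum_alt (y :: r')))]
          rw [setSum_alt_cons]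
          rfl

-- ===== VERDICT (by name: the statement is the Claim_ definition above) =====
theorem setSum_spec : Claim_equal_setSum := by
  intro sets _
  unfold Spec_setSum
  match sets with
  | [] => rfl
  | [s] => rfl
  | s :: x :: r =>
      show List.foldl _ s (x :: r) = _
      rw [foldl_setAdd_eq (x :: r) s (by simp), setSum_alt_cons]
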